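-- pv_equiv track=rewrite | github.com/vibhuuuuu/python-CSA08 | FUNCTION.py | first_n_factors
-- ===== SOURCE A (Python) =====
-- def first_n_factors(number, N):
--     factors = []
--     for i in range(1, number + 1):
--         if number % i == 0:
--             factors.append(i)
--             if len(factors) == N:
--                 break
--     return factors
-- ===== SOURCE B (Python) =====
-- def first_n_factors(number, N):
--     small, large = [], []
--     d = 1
--     while d * d <= number:
--         if number % d == 0:
--             small.append(d)
--             if number // d != d:
--                 large.append(number // d)
--         d += 1
--     divs = small + large[::-1]
--     return divs[:N]
-- ===== Notes on version B (the rewrite author's own statement) =====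
-- stated objective: faster
-- what changed: Instead of scanning all candidates 1..number, B trial-divides only up to sqrt(number), collecting each small divisor d and its cofactor number//d, and assembles the ascending divisor list as small + reversed(large) before taking the first N; Pre_ excludes N <= 0, a non-positive count on which A's len==N break never fires so it accidentally returns every divisor while B's plain slice returns Python's negative-slice result -- neither value is specified for such a count.
-- outside the precondition, e.g. on first_n_factors(6, 0): A returns [1, 2, 3, 6], B returns []; on first_n_factors(6, -2): A returns [1, 2, 3, 6], B returns [1, 2]
import Mathlib
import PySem

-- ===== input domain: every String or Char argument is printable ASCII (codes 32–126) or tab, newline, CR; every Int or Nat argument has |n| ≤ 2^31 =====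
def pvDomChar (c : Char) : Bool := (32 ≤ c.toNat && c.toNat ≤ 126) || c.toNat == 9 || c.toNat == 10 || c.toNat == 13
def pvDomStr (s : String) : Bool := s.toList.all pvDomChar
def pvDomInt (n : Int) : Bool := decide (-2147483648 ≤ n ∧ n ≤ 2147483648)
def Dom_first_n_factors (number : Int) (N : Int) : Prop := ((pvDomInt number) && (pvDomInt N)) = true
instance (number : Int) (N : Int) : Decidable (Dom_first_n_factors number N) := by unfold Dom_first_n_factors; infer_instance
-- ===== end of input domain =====

-- B replaces A's scan over 1..number by trial division up to √number, pairing each small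
-- divisor d with its cofactor number//d (objective: faster; measured).

-- ===== PORT A =====
-- 'for i in range(1, number+1): if number % i == 0: factors.append(i); if len(factors)==N: break'
def pvALoop (number : Int) (N : Int) (acc : List Int) : List Int → List Int
  | [] => acc
  | i :: rest =>
    if PySem.Int.mod number i = 0 then
      if ((acc ++ [i]).length : Int) = N then acc ++ [i]
      else pvALoop number N (acc ++ [i]) rest
    else pvALoop number N acc rest

def first_n_factors (number : Int) (N : Int) : List Int :=
  pvALoop number N [] (PySem.List.pyRange 1 (number + 1) 1)

-- ===== PORT B =====
-- 'while d*d <= number: if number % d == 0: small.append(d); if number//d != d: large.append(number//d); d += 1'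
-- (fuel is a totality guard only: number.toNat + 1 iterations always suffice, since the loop runs while d*d ≤ number)
def pvBLoop (number : Int) (fuel : Nat) (d : Int) (small : List Int) (large : List Int) :
    List Int × List Int :=
  match fuel with
  | 0 => (small, large)
  | fuel + 1 =>
    if d * d ≤ number then
      if PySem.Int.mod number d = 0 then
        pvBLoop number fuel (d + 1) (small ++ [d])
          (if PySem.Int.floordiv number d ≠ d then large ++ [PySem.Int.floordiv number d] else large)
      else pvBLoop number fuel (d + 1) small large
    else (small, large)

-- 'divs = small + large[::-1]; return divs[:N]'
def first_n_factors_alt (number : Int) (N : Int) : List Int :=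
  let p := pvBLoop number (number.toNat + 1) 1 [] []
  let divs := p.1 ++ p.2.reverse
  PySem.List.slice divs none (some N)

-- ===== PRECONDITION & SPEC =====
-- Pre_ excludes N ≤ 0, on which A's len==N break never fires so A accidentally returns every
-- divisor, while B's plain slice gives Python's negative-slice result; neither value is
-- specified for a non-positive requested count.
def Pre_first_n_factors (number : Int) (N : Int) : Prop := 1 ≤ N
instance (number : Int) (N : Int) : Decidable (Pre_first_n_factors number N) := by unfold Pre_first_n_factors; infer_instance
def pvWitness_first_n_factors : Int × Int := (12, 3)

def Spec_first_n_factors (number : Int) (N : Int) (out : List Int) : Prop := out = first_n_factors_alt number N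
instance (number : Int) (N : Int) (out : List Int) : Decidable (Spec_first_n_factors number N out) := by unfold Spec_first_n_factors; infer_instance

-- ===== CLAIM (what is proved, stated in full; the proofs are below) =====
def Claim_equal_first_n_factors : Prop := ∀ (number : Int) (N : Int), Dom_first_n_factors number N → Pre_first_n_factors number N → Spec_first_n_factors number N (first_n_factors number N)

-- ===== LEMMAS AND PROOFS =====
lemma pvDec (n d : Int) (h : d * d ≤ n) :
    (n + 1 - (d + 1)).toNat < (n + 1 - d).toNat := by
  have hdn : d ≤ n := by
    by_cases h0 : d ≤ 0
    · nlinarith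
    · nlinarith
  omega

-- Proof-side mirrors of B's loop (emod/ediv form, valid since d ≥ 1 throughout):
def pvSdiv (n : Int) (d : Int) : List Int :=
  if _h : d * d ≤ n then
    (if n % d = 0 then [d] else []) ++ pvSdiv n (d + 1)
  else []
termination_by (n + 1 - d).toNat
decreasing_by exact pvDec n d _h

def pvLdiv (n : Int) (d : Int) : List Int :=
  if _h : d * d ≤ n then
    (if n % d = 0 ∧ n / d ≠ d then [n / d] else []) ++ pvLdiv n (d + 1)
  else []
termination_by (n + 1 - d).toNat
decreasing_by exact pvDec n d _h

lemma mem_pvSdiv (n : Int) (d : Int) (x : Int) : 1 ≤ d →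
    (x ∈ pvSdiv n d ↔ d ≤ x ∧ x * x ≤ n ∧ n % x = 0) := by
  fun_induction pvSdiv n d with
  | case1 d h ih =>
    intro hd
    rw [List.mem_append, ih (by omega)]
    by_cases hm : n % d = 0
    · rw [if_pos hm]; simp only [List.mem_singleton]
      constructor
      · rintro (rfl | ⟨h1, h2, h3⟩)
        · exact ⟨le_refl _, h, hm⟩
        · exact ⟨by omega, h2, h3⟩
      · rintro ⟨h1, h2, h3⟩
        rcases eq_or_lt_of_le h1 with rfl | h1'
        · exact Or.inl rfl
        · exact Or.inr ⟨by omega, h2, h3⟩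
    · rw [if_neg hm]; simp only [List.not_mem_nil, false_or]
      constructor
      · rintro ⟨h1, h2, h3⟩; exact ⟨by omega, h2, h3⟩
      · rintro ⟨h1, h2, h3⟩
        refine ⟨?_, h2, h3⟩
        rcases eq_or_lt_of_le h1 with rfl | h1'
        · exact absurd h3 hm
        · omega
  | case2 d h =>
    intro hd
    simp only [List.not_mem_nil, false_iff]
    rintro ⟨h1, h2, h3⟩
    nlinarith

lemma mem_pvLdiv (n : Int) (d : Int) (y : Int) : 1 ≤ d →
    (y ∈ pvLdiv n d ↔ ∃ i, d ≤ i ∧ i * i ≤ n ∧ n % i = 0 ∧ n / i ≠ i ∧ y = n / i) := by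
  fun_induction pvLdiv n d with
  | case1 d h ih =>
    intro hd
    rw [List.mem_append, ih (by omega)]
    by_cases hm : n % d = 0 ∧ n / d ≠ d
    · rw [if_pos hm]; simp only [List.mem_singleton]
      constructor
      · rintro (rfl | ⟨i, h1, h2, h3, h4, rfl⟩)
        · exact ⟨d, le_refl _, h, hm.1, hm.2, rfl⟩
        · exact ⟨i, by omega, h2, h3, h4, rfl⟩
      · rintro ⟨i, h1, h2, h3, h4, rfl⟩
        rcases eq_or_lt_of_le h1 with rfl | h1'
        · exact Or.inl rfl
        · exact Or.inr ⟨i, by omega, h2, h3, h4, rfl⟩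
    · rw [if_neg hm]; simp only [List.not_mem_nil, false_or]
      constructor
      · rintro ⟨i, h1, h2, h3, h4, rfl⟩; exact ⟨i, by omega, h2, h3, h4, rfl⟩
      · rintro ⟨i, h1, h2, h3, h4, rfl⟩
        rcases eq_or_lt_of_le h1 with rfl | h1'
        · exact absurd ⟨h3, h4⟩ hm
        · exact ⟨i, by omega, h2, h3, h4, rfl⟩
  | case2 d h =>
    intro hd
    simp only [List.not_mem_nil, false_iff]
    rintro ⟨i, h1, h2, h3, h4, rfl⟩
    nlinarith

lemma pairwise_pvSdiv (n : Int) (d : Int) : 1 ≤ d → (pvSdiv n d).Pairwise (· < ·) := by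
  fun_induction pvSdiv n d with
  | case1 d h ih =>
    intro hd
    by_cases hm : n % d = 0
    · rw [if_pos hm, List.singleton_append, List.pairwise_cons]
      refine ⟨fun y hy => ?_, ih (by omega)⟩
      have := (mem_pvSdiv n (d + 1) y (by omega)).1 hy
      omega
    · rw [if_neg hm, List.nil_append]; exact ih (by omega)
  | case2 d h => intro _; exact List.Pairwise.nil

lemma pv_div_lt_div (n a b : Int) (hn : 1 ≤ n) (ha : 1 ≤ a) (hab : a < b)
    (hda : n % a = 0) (hdb : n % b = 0) : n / b < n / a := by
  have Da : a ∣ n := Int.dvd_of_emod_eq_zero hda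
  have Db : b ∣ n := Int.dvd_of_emod_eq_zero hdb
  have ea : a * (n / a) = n := Int.mul_ediv_cancel' Da
  have eb : b * (n / b) = n := Int.mul_ediv_cancel' Db
  have h1a : 1 ≤ n / a := by nlinarith
  have h1b : 1 ≤ n / b := by nlinarith
  by_contra hle
  push Not at hle
  nlinarith

lemma pv_div_ge (n i : Int) (hi : 1 ≤ i) (h2 : i * i ≤ n) (hm : n % i = 0) : i ≤ n / i := by
  have e : i * (n / i) = n := Int.mul_ediv_cancel' (Int.dvd_of_emod_eq_zero hm)
  nlinarith

lemma pairwise_pvLdiv (n : Int) (hn : 1 ≤ n) (d : Int) : 1 ≤ d → (pvLdiv n d).Pairwise (· > ·) := by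
  fun_induction pvLdiv n d with
  | case1 d h ih =>
    intro hd
    by_cases hm : n % d = 0 ∧ n / d ≠ d
    · rw [if_pos hm, List.singleton_append, List.pairwise_cons]
      refine ⟨fun y hy => ?_, ih (by omega)⟩
      obtain ⟨i, h1, h2, h3, h4, rfl⟩ := (mem_pvLdiv n (d + 1) y (by omega)).1 hy
      exact pv_div_lt_div n d i hn hd (by omega) hm.1 h3
    · rw [if_neg hm, List.nil_append]; exact ih (by omega)
  | case2 d h => intro _; exact List.Pairwise.nil

lemma pvDivs_eq (n : Int) (hn : 1 ≤ n) :
    pvSdiv n 1 ++ (pvLdiv n 1).reverse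
      = (PySem.List.pyRange 1 (n + 1) 1).filter (fun i => decide (PySem.Int.mod n i = 0)) := by
  -- membership of the left list
  have memL : ∀ x, x ∈ pvSdiv n 1 ++ (pvLdiv n 1).reverse ↔ (1 ≤ x ∧ x ≤ n ∧ n % x = 0) := by
    intro x
    rw [List.mem_append, List.mem_reverse, mem_pvSdiv n 1 x le_rfl, mem_pvLdiv n 1 x le_rfl]
    constructor
    · rintro (⟨h1, h2, h3⟩ | ⟨i, h1, h2, h3, h4, rfl⟩)
      · exact ⟨h1, by nlinarith, h3⟩
      · have e : i * (n / i) = n := Int.mul_ediv_cancel' (Int.dvd_of_emod_eq_zero h3)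
        have hge : i ≤ n / i := pv_div_ge n i h1 h2 h3
        have h1y : 1 ≤ n / i := by nlinarith
        refine ⟨h1y, by nlinarith, ?_⟩
        have : (n / i) ∣ n := Dvd.intro i (by linarith [e, mul_comm i (n / i)])
        exact Int.emod_eq_zero_of_dvd this
    · rintro ⟨h1, h2, h3⟩
      by_cases hs : x * x ≤ n
      · exact Or.inl ⟨h1, hs, h3⟩
      · push Not at hs
        right
        have Dx : x ∣ n := Int.dvd_of_emod_eq_zero h3
        have e : x * (n / x) = n := Int.mul_ediv_cancel' Dx
        have h1i : 1 ≤ n / x := by nlinarith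
        have hix : n / x < x := by nlinarith
        have Di : (n / x) ∣ n := Dvd.intro x (by linarith [e, mul_comm x (n / x)])
        have ei : (n / x) * (n / (n / x)) = n := Int.mul_ediv_cancel' Di
        have hback : n / (n / x) = x := by
          have := e
          nlinarith
        refine ⟨n / x, h1i, by nlinarith, Int.emod_eq_zero_of_dvd Di, ?_, hback.symm⟩
        rw [hback]; omega
  -- pairwise of the left list
  have pwL : (pvSdiv n 1 ++ (pvLdiv n 1).reverse).Pairwise (· < ·) := by
    rw [List.pairwise_append]
    refine ⟨pairwise_pvSdiv n 1 le_rfl, ?_, ?_⟩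
    · rw [List.pairwise_reverse]
      exact (pairwise_pvLdiv n hn 1 le_rfl).imp (fun h => h)
    · intro x hx y hy
      rw [List.mem_reverse] at hy
      obtain ⟨h1, h2, h3⟩ := (mem_pvSdiv n 1 x le_rfl).1 hx
      obtain ⟨i, g1, g2, g3, g4, rfl⟩ := (mem_pvLdiv n 1 y le_rfl).1 hy
      have hge : i < n / i := lt_of_le_of_ne (pv_div_ge n i g1 g2 g3) (Ne.symm g4)
      have e : i * (n / i) = n := Int.mul_ediv_cancel' (Int.dvd_of_emod_eq_zero g3)
      nlinarith
  -- membership and pairwise of the right list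
  have memR : ∀ x, x ∈ (PySem.List.pyRange 1 (n + 1) 1).filter
      (fun i => decide (PySem.Int.mod n i = 0)) ↔ (1 ≤ x ∧ x ≤ n ∧ n % x = 0) := by
    intro x
    rw [List.mem_filter, PySem.List.mem_pyRange_one]
    constructor
    · rintro ⟨⟨h1, h2⟩, h3⟩
      rw [decide_eq_true_iff, PySem.Int.mod_eq_emod_of_pos (by omega)] at h3
      exact ⟨h1, by omega, h3⟩
    · rintro ⟨h1, h2, h3⟩
      refine ⟨⟨h1, by omega⟩, ?_⟩
      rw [decide_eq_true_iff, PySem.Int.mod_eq_emod_of_pos (by omega)]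
      exact h3
  have pwR : ((PySem.List.pyRange 1 (n + 1) 1).filter
      (fun i => decide (PySem.Int.mod n i = 0))).Pairwise (· < ·) :=
    (PySem.List.pairwise_lt_pyRange_one 1 (n + 1)).filter _
  -- equality from perm + sortedness
  have hperm : (pvSdiv n 1 ++ (pvLdiv n 1).reverse).Perm
      ((PySem.List.pyRange 1 (n + 1) 1).filter (fun i => decide (PySem.Int.mod n i = 0))) := by
    rw [List.perm_ext_iff_of_nodup (pwL.imp ne_of_lt) (pwR.imp ne_of_lt)]
    intro a; rw [memL, memR]
  exact hperm.eq_of_pairwise (fun a b _ _ h1 h2 => le_antisymm h1 h2)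
    (pwL.imp le_of_lt) (pwR.imp le_of_lt)

lemma pvBLoop_eq (n : Int) : ∀ (fuel : Nat) (d : Int) (s l : List Int), 1 ≤ d →
    (n + 1 - d).toNat ≤ fuel →
    pvBLoop n fuel d s l = (s ++ pvSdiv n d, l ++ pvLdiv n d) := by
  intro fuel
  induction fuel with
  | zero =>
    intro d s l hd hf
    have hnd : n < d := by omega
    have hno : ¬ d * d ≤ n := by nlinarith
    rw [pvBLoop, pvSdiv, pvLdiv, dif_neg hno, dif_neg hno]
    simp
  | succ fuel ih =>
    intro d s l hd hf
    rw [pvBLoop, pvSdiv, pvLdiv]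
    by_cases h : d * d ≤ n
    · have hd' : d ≤ n := by nlinarith
      have hf' : (n + 1 - (d + 1)).toNat ≤ fuel := by omega
      rw [if_pos h, dif_pos h, dif_pos h]
      by_cases hm : PySem.Int.mod n d = 0
      · have hm' : n % d = 0 := by
          rwa [PySem.Int.mod_eq_emod_of_pos (by omega : (0:Int) < d)] at hm
        rw [if_pos hm, if_pos hm', ih (d + 1) _ _ (by omega) hf']
        by_cases hq : PySem.Int.floordiv n d ≠ d
        · have hq' : n / d ≠ d := by
            rwa [PySem.Int.floordiv_eq_ediv_of_pos (by omega : (0:Int) < d)] at hq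
          rw [if_pos hq, if_pos (show n % d = 0 ∧ n / d ≠ d from ⟨hm', hq'⟩),
            PySem.Int.floordiv_eq_ediv_of_pos (by omega : (0:Int) < d)]
          simp [List.append_assoc]
        · have hq' : ¬ n / d ≠ d := by
            rwa [PySem.Int.floordiv_eq_ediv_of_pos (by omega : (0:Int) < d)] at hq
          rw [if_neg hq, if_neg (show ¬ (n % d = 0 ∧ n / d ≠ d) by tauto)]
          simp [List.append_assoc]
      · have hm' : ¬ n % d = 0 := by
          rwa [PySem.Int.mod_eq_emod_of_pos (by omega : (0:Int) < d)] at hm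
        rw [if_neg hm, if_neg hm', if_neg (show ¬ (n % d = 0 ∧ n / d ≠ d) by tauto),
          ih (d + 1) _ _ (by omega) hf']
        simp
    · rw [if_neg h, dif_neg h, dif_neg h]
      simp

lemma pvALoop_break (n N : Int) : ∀ (l : List Int) (acc : List Int), (acc.length : Int) < N →
    pvALoop n N acc l
      = acc ++ (l.filter (fun i => decide (PySem.Int.mod n i = 0))).take (N - acc.length).toNat := by
  intro l
  induction l with
  | nil => intro acc _; simp [pvALoop]
  | cons i rest ih =>
    intro acc hlt
    rw [pvALoop]
    by_cases hm : PySem.Int.mod n i = 0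
    · rw [if_pos hm]
      by_cases hbr : ((acc ++ [i]).length : Int) = N
      · rw [if_pos hbr]
        simp only [List.length_append, List.length_singleton] at hbr
        have h1 : (N - (acc.length : Int)).toNat = 1 := by omega
        simp [hm, h1]
      · rw [if_neg hbr]
        simp only [List.length_append, List.length_singleton] at hbr
        rw [ih (acc ++ [i]) (by simp; omega)]
        have h2 : (N - (acc.length : Int)).toNat = (N - ((acc.length : Int) + 1)).toNat + 1 := by
          omega
        simp [hm, h2, List.append_assoc]
    · rw [if_neg hm, ih acc hlt]
      simp [hm]

-- ===== VERDICT (by name: the statement is the Claim_ definition above) =====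
theorem first_n_factors_spec : Claim_equal_first_n_factors := by
  intro n N _dom hN
  unfold Pre_first_n_factors at hN
  unfold Spec_first_n_factors
  unfold first_n_factors first_n_factors_alt
  have hsl : ∀ (xs : List Int), PySem.List.slice xs none (some N) = xs.take N.toNat := by
    intro xs
    conv_lhs => rw [show N = ((N.toNat : Nat) : Int) from by omega]
    exact PySem.List.slice_to_natCast xs N.toNat
  by_cases hn : 1 ≤ n
  · rw [pvBLoop_eq n (n.toNat + 1) 1 [] [] le_rfl (by omega)]
    simp only [List.nil_append]
    rw [pvDivs_eq n hn, hsl, pvALoop_break n N _ [] (by simpa using by omega)]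
    simp
  · push Not at hn
    rw [PySem.List.pyRange_one_eq_nil (by omega)]
    rw [pvBLoop_eq n (n.toNat + 1) 1 [] [] le_rfl (by omega)]
    rw [pvSdiv, pvLdiv, dif_neg (by nlinarith), dif_neg (by nlinarith)]
    simp only [List.append_nil, List.reverse_nil]
    rw [hsl]
    simp [pvALoop]
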